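-- pv_equiv track=rewrite | github.com/ketkat001/Programmers-coding | Level_1/3진법뒤집기.py | solution
-- ===== SOURCE A (Python) =====
-- def solution(n):
--     answer = 0
--     temp = []
--     while n > 0:
--         n, num = divmod(n, 3)
--         temp.append(num)
--     for i in range(len(temp)):
--         answer += temp[i] * (3**(len(temp)-i-1))
--     return answer
-- ===== SOURCE B (Python) =====
-- def solution(n):
--     def go(m):
--         # returns (reversed-ternary value of m, 3 ** (number of ternary digits of m))
--         if m <= 0:
--             return 0, 1
--         v, p = go(m // 3)
--         return (m % 3) * p + v, p * 3
--     return go(n)[0]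
-- ===== Notes on version B (the rewrite author's own statement) =====
-- stated objective: alternative
-- what changed: B replaces A's iterative digit-list build plus second power-summing pass by one structural recursion returning a (reversed value, weight) pair, combining each digit on the way back up.
import Mathlib
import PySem

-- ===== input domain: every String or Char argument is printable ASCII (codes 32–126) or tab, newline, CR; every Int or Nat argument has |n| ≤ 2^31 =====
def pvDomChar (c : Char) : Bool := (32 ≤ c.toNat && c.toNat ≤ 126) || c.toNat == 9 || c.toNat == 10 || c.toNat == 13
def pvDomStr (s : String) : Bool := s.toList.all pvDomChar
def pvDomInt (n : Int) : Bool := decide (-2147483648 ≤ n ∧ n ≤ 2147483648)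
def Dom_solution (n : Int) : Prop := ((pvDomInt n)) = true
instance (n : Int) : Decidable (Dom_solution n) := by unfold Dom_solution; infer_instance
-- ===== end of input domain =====

-- B replaces A's digit-list build + second power-summing pass by one structural recursion returning a (value, weight) pair (alternative decomposition).
-- Both loops are written with an explicit Nat fuel (n.toNat, enough since n strictly shrinks under //3) purely to make the recursion structural.

-- ===== PORT A =====
-- while n > 0: n, num = divmod(n, 3); temp.append(num)
def solCollect : Nat → Int → List Int → List Int
  | 0, _, temp => temp
  | f + 1, n, temp =>
    if 0 < n then solCollect f (PySem.Int.floordiv n 3) (temp ++ [PySem.Int.mod n 3]) else temp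

def solution (n : Int) : Int :=
  let temp := solCollect n.toNat n []
  -- for i in range(len(temp)): answer += temp[i] * (3**(len(temp)-i-1))
  (List.range temp.length).foldl
    (fun answer i => answer + temp.getD i 0 * (3 : Int) ^ (temp.length - i - 1)) 0

-- ===== PORT B =====
-- def go(m): if m <= 0: return 0, 1
--            v, p = go(m // 3); return (m % 3) * p + v, p * 3
def solGoPair : Nat → Int → Int × Int
  | 0, _ => (0, 1)
  | f + 1, m =>
    if m ≤ 0 then (0, 1)
    else
      let vp := solGoPair f (PySem.Int.floordiv m 3)
      (PySem.Int.mod m 3 * vp.2 + vp.1, vp.2 * 3)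

def solution_alt (n : Int) : Int := (solGoPair n.toNat n).1

-- ===== PRECONDITION & SPEC =====
def Spec_solution (n : Int) (out : Int) : Prop := out = solution_alt n
instance (n : Int) (out : Int) : Decidable (Spec_solution n out) := by unfold Spec_solution; infer_instance

-- ===== CLAIM (what is proved, stated in full; the proofs are below) =====
def Claim_equal_solution : Prop := ∀ (n : Int), Dom_solution n → Spec_solution n (solution n)

-- ===== LEMMAS AND PROOFS =====

-- value of a ternary-digit list read most-significant-first
def pvVal : List Int → Int
  | [] => 0
  | d :: r => d * 3 ^ r.length + pvVal r

theorem solCollect_append (f : Nat) (n : Int) (acc : List Int) :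
    solCollect f n acc = acc ++ solCollect f n [] := by
  induction f generalizing n acc with
  | zero => simp [solCollect]
  | succ f ih =>
    by_cases h : 0 < n
    · rw [solCollect, if_pos h, ih]
      conv_rhs => rw [solCollect, if_pos h, ih]
      simp
    · rw [solCollect, if_neg h]
      conv_rhs => rw [solCollect, if_neg h]
      simp

-- B's recursive pair computes (value of the digit list A collects, 3 ^ its length)
theorem solGoPair_eq (f : Nat) (n : Int) :
    solGoPair f n = (pvVal (solCollect f n []), 3 ^ (solCollect f n []).length) := by
  induction f generalizing n with
  | zero => simp [solGoPair, solCollect, pvVal]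
  | succ f ih =>
    by_cases h : 0 < n
    · have hc : solCollect (f + 1) n [] =
          PySem.Int.mod n 3 :: solCollect f (PySem.Int.floordiv n 3) [] := by
        rw [solCollect, if_pos h, solCollect_append]; simp
      rw [solGoPair, if_neg (by omega), ih, hc]
      simp [pvVal, pow_succ, mul_comm]
    · rw [solGoPair, if_pos (by omega), solCollect, if_neg h]
      simp [pvVal]

theorem sumloop (t : List Int) (c : Int) :
    (List.range t.length).foldl
      (fun answer i => answer + t.getD i 0 * (3 : Int) ^ (t.length - i - 1)) c
    = c + pvVal t := by
  induction t generalizing c with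
  | nil => simp [pvVal]
  | cons d r ih =>
    have hf : (fun (x : Int) (y : Nat) =>
        x + (d :: r).getD y.succ 0 * (3 : Int) ^ (r.length + 1 - y.succ - 1))
        = (fun (a : Int) (i : Nat) => a + r.getD i 0 * (3 : Int) ^ (r.length - i - 1)) := by
      funext a i
      simp [Nat.succ_sub_succ]
    rw [List.length_cons, List.range_succ_eq_map, List.foldl_cons, List.foldl_map, hf, ih]
    simp only [List.getD_cons_zero, pvVal, Nat.add_sub_cancel, Nat.sub_zero]
    ring

-- ===== VERDICT (by name: the statement is the Claim_ definition above) =====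
theorem solution_spec : Claim_equal_solution := by
  intro n _
  unfold Spec_solution solution solution_alt
  rw [solGoPair_eq, sumloop]
  simp
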